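-- pv_equiv track=rewrite | github.com/EliahKagan/old-practice-snapshot | main/alternative-sorting/alternative-sorting.py | alternating_order
-- ===== SOURCE A (Python) =====
-- def alternating_order(a): # a must be sorted nondecreasingly
--     j = len(a) - 1
--     i = 0
--
--     while i < j:
--         yield a[j]
--         yield a[i]
--         j -= 1
--         i += 1
--
--     if i == j:
--         yield a[i]
-- ===== SOURCE B (Python) =====
-- def alternating_order(a):  # a must be sorted nondecreasingly
--     n = len(a)
--     hi = a[(n + 1) // 2:][::-1]   # top n//2 elements, descending
--     lo = a[:n // 2]               # bottom n//2 elements, ascending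
--     for h, l in zip(hi, lo):
--         yield h
--         yield l
--     if n % 2 == 1:
--         yield a[n // 2]
-- ===== Notes on version B (the rewrite author's own statement) =====
-- stated objective: alternative
-- what changed: Replaced A's two-pointer while-loop over mutable indices by slicing: zip the reversed upper half with the lower half and yield high,low per pair, then the middle element when the length is odd.
import Mathlib
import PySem

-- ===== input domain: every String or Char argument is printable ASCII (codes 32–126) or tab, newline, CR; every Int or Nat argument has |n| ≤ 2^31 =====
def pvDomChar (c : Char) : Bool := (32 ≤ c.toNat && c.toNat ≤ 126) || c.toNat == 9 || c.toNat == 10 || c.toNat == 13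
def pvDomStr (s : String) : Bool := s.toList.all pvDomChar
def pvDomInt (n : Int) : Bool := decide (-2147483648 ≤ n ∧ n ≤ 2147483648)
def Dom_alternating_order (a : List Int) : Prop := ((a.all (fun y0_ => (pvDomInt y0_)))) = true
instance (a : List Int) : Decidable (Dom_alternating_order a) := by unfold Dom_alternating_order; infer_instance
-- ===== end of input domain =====

-- B replaces A's two-pointer while-loop by slicing: zip the reversed upper half with
-- the lower half (yield high then low per pair), then the odd middle element; same cost,
-- different decomposition. Equivalence of the yielded sequences (as lists) is proved below.

-- ===== PORT A =====
-- the while loop: state (i, j), yields a[j], a[i] each iteration; a[·] always in range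
-- on reachable states, so the total form pyGetD is used (default never read).
def altA_loop (a : List Int) (i j : Int) : List Int :=
  if i < j then
    PySem.List.pyGetD a j 0 :: PySem.List.pyGetD a i 0 :: altA_loop a (i + 1) (j - 1)
  else if i = j then [PySem.List.pyGetD a i 0]
  else []
termination_by (j - i).toNat
decreasing_by omega

def alternating_order (a : List Int) : List Int :=
  altA_loop a 0 ((a.length : Int) - 1)

-- ===== PORT B =====
-- Source B: hi = a[(n+1)//2:][::-1]; lo = a[:n//2]; for h,l in zip(hi,lo): yield h; yield l;
-- if n % 2 == 1: yield a[n//2].  ([::-1] is List.reverse, per PySem.List.slice?_none_none_neg_one.)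
def alternating_order_alt (a : List Int) : List Int :=
  let n : Int := a.length
  let hi := (PySem.List.slice a (some (PySem.Int.floordiv (n + 1) 2)) none).reverse
  let lo := PySem.List.slice a none (some (PySem.Int.floordiv n 2))
  ((hi.zip lo).flatMap (fun p => [p.1, p.2])) ++
    (if PySem.Int.mod n 2 = 1 then [PySem.List.pyGetD a (PySem.Int.floordiv n 2) 0] else [])

-- ===== PRECONDITION & SPEC =====
def Spec_alternating_order (a : List Int) (out : List Int) : Prop := out = alternating_order_alt a
instance (a : List Int) (out : List Int) : Decidable (Spec_alternating_order a out) := by unfold Spec_alternating_order; infer_instance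

-- ===== CLAIM (what is proved, stated in full; the proofs are below) =====
def Claim_equal_alternating_order : Prop := ∀ (a : List Int), Dom_alternating_order a → Spec_alternating_order a (alternating_order a)

-- ===== LEMMAS AND PROOFS =====

-- Nat-typed halves of B, for the induction.
def pvHi (a : List Int) : List Int := (a.drop ((a.length + 1) / 2)).reverse
def pvLo (a : List Int) : List Int := a.take (a.length / 2)
def pvMid (a : List Int) : List Int :=
  if a.length % 2 = 1 then [a.getD (a.length / 2) 0] else []

theorem pvHi_length (a : List Int) : (pvHi a).length = a.length / 2 := by
  simp [pvHi]; omega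

theorem alt_eq_nat (a : List Int) :
    alternating_order_alt a =
      ((pvHi a).zip (pvLo a)).flatMap (fun p => [p.1, p.2]) ++ pvMid a := by
  unfold alternating_order_alt pvHi pvLo pvMid
  have h1 : PySem.Int.floordiv ((a.length : Int) + 1) 2 = (((a.length + 1) / 2 : Nat) : Int) := by
    exact_mod_cast PySem.Int.floordiv_natCast (a.length + 1) 2
  have h2 : PySem.Int.floordiv ((a.length : Int)) 2 = ((a.length / 2 : Nat) : Int) := by
    exact_mod_cast PySem.Int.floordiv_natCast a.length 2
  have h3 : PySem.Int.mod ((a.length : Int)) 2 = ((a.length % 2 : Nat) : Int) := by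
    exact_mod_cast PySem.Int.mod_natCast a.length 2
  simp only [h1, h2, h3, PySem.List.slice_from_natCast, PySem.List.slice_to_natCast,
    PySem.List.pyGetD_natCast]
  congr 1
  split_ifs with hodd hodd' hodd'
  · rfl
  · exact absurd (by exact_mod_cast hodd) hodd'
  · exact absurd (by exact_mod_cast hodd') hodd
  · rfl

theorem loop_eq (a : List Int) :
    ∀ (k p : Nat), p + k = a.length / 2 →
      altA_loop a (p : Int) ((a.length : Int) - 1 - p) =
        (((pvHi a).drop p).zip ((pvLo a).drop p)).flatMap (fun q => [q.1, q.2]) ++ pvMid a := by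
  intro k
  induction k with
  | zero =>
    intro p hp
    rw [altA_loop]
    have hnotlt : ¬ ((p : Int) < (a.length : Int) - 1 - p) := by omega
    rw [if_neg hnotlt]
    have hdropHi : (pvHi a).drop p = [] := by
      apply List.drop_eq_nil_of_le
      rw [pvHi_length]; omega
    rw [hdropHi]
    simp only [List.zip_nil_left, List.flatMap_nil, List.nil_append]
    by_cases hodd : a.length % 2 = 1
    · have heq : (p : Int) = (a.length : Int) - 1 - p := by omega
      rw [if_pos heq, pvMid, if_pos hodd]
      have := PySem.List.pyGetD_natCast a p (0 : Int)
      rw [this]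
      have : p = a.length / 2 := by omega
      rw [this]
    · have hne : (p : Int) ≠ (a.length : Int) - 1 - p := by omega
      rw [if_neg hne, pvMid, if_neg hodd]
  | succ k ih =>
    intro p hp
    rw [altA_loop]
    have hlt : ((p : Int) < (a.length : Int) - 1 - p) := by omega
    rw [if_pos hlt]
    have hpHi : p < (pvHi a).length := by rw [pvHi_length]; omega
    have hpLo : p < (pvLo a).length := by simp [pvLo]; omega
    rw [List.drop_eq_getElem_cons hpHi, List.drop_eq_getElem_cons hpLo,
      List.zip_cons_cons, List.flatMap_cons]
    have hHi : (pvHi a)[p] = a.getD (a.length - 1 - p) 0 := by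
      unfold pvHi
      rw [List.getElem_reverse, List.getElem_drop]
      rw [List.getD_eq_getElem a 0 (by omega)]
      congr 1
      simp only [pvHi, List.length_reverse, List.length_drop] at hpHi ⊢
      omega
    have hLo : (pvLo a)[p] = a.getD p 0 := by
      unfold pvLo
      rw [List.getElem_take, List.getD_eq_getElem a 0 (by simp [pvLo] at hpLo; omega)]
    have hj : PySem.List.pyGetD a ((a.length : Int) - 1 - p) 0 = a.getD (a.length - 1 - p) 0 := by
      have hcast : ((a.length : Int) - 1 - p) = ((a.length - 1 - p : Nat) : Int) := by omega
      rw [hcast, PySem.List.pyGetD_natCast]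
    have hi' : PySem.List.pyGetD a ((p : Int)) 0 = a.getD p 0 := PySem.List.pyGetD_natCast a p 0
    rw [hj, hi', hHi, hLo]
    have hrec : altA_loop a ((p : Int) + 1) ((a.length : Int) - 1 - p - 1) =
        (((pvHi a).drop (p + 1)).zip ((pvLo a).drop (p + 1))).flatMap (fun q => [q.1, q.2]) ++ pvMid a := by
      have := ih (p + 1) (by omega)
      have hc1 : ((p + 1 : Nat) : Int) = (p : Int) + 1 := by push_cast; ring
      rw [hc1] at this
      have hc2 : (a.length : Int) - 1 - ((p : Int) + 1) = (a.length : Int) - 1 - p - 1 := by ring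
      rw [hc2] at this
      exact this
    rw [hrec]
    simp

-- ===== VERDICT (by name: the statement is the Claim_ definition above) =====
theorem alternating_order_spec : Claim_equal_alternating_order := by
  intro a _
  show alternating_order a = alternating_order_alt a
  rw [alt_eq_nat, alternating_order]
  have h0 : ((0 : Nat) : Int) = (0 : Int) := rfl
  have := loop_eq a (a.length / 2) 0 (by omega)
  rw [h0] at this
  simpa using this
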